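-- pv_equiv track=rewrite | github.com/MegaGiciorPortas/ASD | Oioioi/2.1_off.py | function
-- ===== SOURCE A (Python) =====
-- def function(T: list[list[int]]) -> tuple[int, int]:
--     current = 0
--     max_snieg = 0
--     max_indeks = 0
--     n = len(T)
--
--     for indeks, element in enumerate(T):
--         current += element[1]
--
--         if indeks == n - 1 or element[0] != T[indeks + 1][0]:
--             if current > max_snieg:
--                 max_snieg = current
--                 max_indeks = element[0]
--
--     return max_snieg, max_indeks
-- ===== SOURCE B (Python) =====
-- from itertools import accumulate
--
--
-- def function(T: list[list[int]]) -> tuple[int, int]: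
--     keys = [e[0] for e in T]
--     totals = list(accumulate(e[1] for e in T))
--     cands = [(t, k)
--              for (t, k), nk in zip(zip(totals, keys), keys[1:] + [None])
--              if nk is None or k != nk]
--     if not cands:
--         return (0, 0)
--     best = max(cands, key=lambda c: c[0])
--     return best if best[0] > 0 else (0, 0)
-- ===== Notes on version B (the rewrite author's own statement) =====
-- stated objective: alternative
-- what changed: B is a staged pipeline: it builds the list of running prefix sums with itertools.accumulate, selects the (total, key) candidates at group boundaries by zipping with the shifted key list, and takes max(key=first component) with a >0 threshold, instead of A's single loop maintaining a running max with an index lookahead.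
import Mathlib
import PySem

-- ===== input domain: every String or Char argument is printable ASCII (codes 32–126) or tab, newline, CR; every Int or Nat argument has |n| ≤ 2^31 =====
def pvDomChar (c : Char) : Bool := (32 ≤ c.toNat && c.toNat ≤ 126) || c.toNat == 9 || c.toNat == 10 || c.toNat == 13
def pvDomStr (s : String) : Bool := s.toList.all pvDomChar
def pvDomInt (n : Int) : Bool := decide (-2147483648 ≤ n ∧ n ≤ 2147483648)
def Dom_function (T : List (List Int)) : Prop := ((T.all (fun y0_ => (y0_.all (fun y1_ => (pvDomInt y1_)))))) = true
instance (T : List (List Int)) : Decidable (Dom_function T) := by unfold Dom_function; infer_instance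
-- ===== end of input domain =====

-- B is a staged pipeline (prefix sums via accumulate, a candidate list at group
-- boundaries via zip with the shifted key list, then max by key and a >0 guard),
-- replacing A's single running-max loop with index lookahead; same cost, alternative.

-- shared row accessors: row[0] / row[1]; the .getD 0 default is never reached under
-- Pre_function (every row has length ≥ 2, so the Python never raises)
def gk (x : List Int) : Int := (PySem.List.pyGet? x 0).getD 0
def gv (x : List Int) : Int := (PySem.List.pyGet? x 1).getD 0

-- ===== PORT A =====
-- one body step of A's 'for indeks, element in enumerate(T)' loop; state = (current, max_snieg, max_indeks)
def stepA (T : List (List Int)) (st : Int × Int × Int) (p : Int × List Int) : Int × Int × Int :=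
  let current := st.1 + gv p.2
  if p.1 = (T.length : Int) - 1 ∨ gk p.2 ≠ ((PySem.List.pyGet? T (p.1 + 1)).map gk).getD 0 then
    if current > st.2.1 then (current, current, gk p.2) else (current, st.2.1, st.2.2)
  else (current, st.2.1, st.2.2)

def function (T : List (List Int)) : Int × Int :=
  let r := (PySem.List.enumerate T 0).foldl (stepA T) (0, 0, 0)
  (r.2.1, r.2.2)

-- ===== PORT B =====
-- list(accumulate(e[1] for e in T)) : running sums (no initial element)
def accum (s : Int) : List Int → List Int
  | [] => []
  | v :: vs => (s + v) :: accum (s + v) vs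

-- one step of Python's max(..., key=lambda c: c[0]) scan: replace only on strictly larger key
def updMax (cur x : Int × Int) : Int × Int := if x.1 > cur.1 then x else cur

-- the comprehension's filter+element: keep (total, key) when at a group boundary
def boundary (p : (Int × Int) × Option Int) : Option (Int × Int) :=
  match p.2 with
  | Option.none => some p.1
  | Option.some nk => if p.1.2 ≠ nk then some p.1 else none

def function_alt (T : List (List Int)) : Int × Int :=
  let keys := T.map gk
  let totals := accum 0 (T.map gv)
  let nexts := (keys.drop 1).map Option.some ++ [Option.none]
  let cands := ((totals.zip keys).zip nexts).filterMap boundary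
  match cands with
  | [] => (0, 0)
  | c :: cs =>
    let best := cs.foldl updMax c
    if best.1 > 0 then best else (0, 0)

-- ===== PRECONDITION & SPEC =====
-- Python A reads row[0] and row[1] of every row, so it raises IndexError exactly
-- when some row has fewer than 2 entries; B raises there too.
def Pre_function (T : List (List Int)) : Prop := ∀ x ∈ T, 2 ≤ x.length
instance (T : List (List Int)) : Decidable (Pre_function T) := by unfold Pre_function; infer_instance
def pvWitness_function : List (List Int) := [[1, 2], [1, 3], [2, 5]]

def Spec_function (T : List (List Int)) (out : Int × Int) : Prop := out = function_alt T
instance (T : List (List Int)) (out : Int × Int) : Decidable (Spec_function T out) := by unfold Spec_function; infer_instance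

-- ===== CLAIM (what is proved, stated in full; the proofs are below) =====
def Claim_equal_function : Prop := ∀ (T : List (List Int)), Dom_function T → Pre_function T → Spec_function T (function T)

-- ===== LEMMAS AND PROOFS =====

-- the strict-max update A performs at a group boundary
def upd (st : Int × Int × Int) (c k : Int) : Int × Int × Int :=
  if c > st.2.1 then (c, c, k) else (c, st.2.1, st.2.2)

-- A's loop, rewritten as structural recursion on the suffix still to be processed:
-- the lookahead 'indeks == n-1 or element[0] != T[indeks+1][0]' becomes a match on the tail
def aLoop : Int × Int × Int → List (List Int) → Int × Int × Int
  | st, [] => st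
  | st, x :: xs =>
    let st' :=
      match xs with
      | [] => upd st (st.1 + gv x) (gk x)
      | y :: _ =>
        if gk x ≠ gk y then upd st (st.1 + gv x) (gk x)
        else (st.1 + gv x, st.2.1, st.2.2)
    aLoop st' xs

lemma aLoop_nil (st : Int × Int × Int) : aLoop st [] = st := rfl

lemma aLoop_single (st : Int × Int × Int) (x : List Int) :
    aLoop st [x] = upd st (st.1 + gv x) (gk x) := rfl

lemma aLoop_cons₂ (st : Int × Int × Int) (x y : List Int) (ys : List (List Int)) :
    aLoop st (x :: y :: ys) =
      aLoop (if gk x ≠ gk y then upd st (st.1 + gv x) (gk x)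
             else (st.1 + gv x, st.2.1, st.2.2)) (y :: ys) := rfl

lemma foldl_enum_eq_aLoop (l pre : List (List Int)) (st : Int × Int × Int) :
    (PySem.List.enumerate l (pre.length : Int)).foldl (stepA (pre ++ l)) st = aLoop st l := by
  induction l generalizing pre st with
  | nil => simp [PySem.List.enumerate_nil, aLoop]
  | cons x xs ih =>
    rw [PySem.List.enumerate_cons, List.foldl_cons]
    have hlen' : ((pre ++ [x]).length : Int) = (pre.length : Int) + 1 := by
      simp
    have ih' := ih (pre ++ [x]) (stepA (pre ++ x :: xs) st ((pre.length : Int), x))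
    simp only [List.append_assoc, List.singleton_append] at ih'
    rw [hlen'] at ih'
    rw [ih']
    cases xs with
    | nil =>
      have hcond : (pre.length : Int) = ((pre ++ [x]).length : Int) - 1 := by
        rw [hlen']; ring
      rw [aLoop_nil, aLoop_single]
      simp only [stepA, upd]
      rw [if_pos (Or.inl hcond)]
    | cons y ys =>
      have hget : PySem.List.pyGet? (pre ++ x :: y :: ys) ((pre.length : Int) + 1) = some y := by
        have h2 : pre ++ x :: y :: ys = (pre ++ [x]) ++ y :: ys := by simp
        rw [h2, ← hlen']
        exact PySem.List.pyGet?_append_length _ _ _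
      have hne : ¬ ((pre.length : Int) = ((pre ++ x :: y :: ys).length : Int) - 1) := by
        push_cast [List.length_append, List.length_cons]; omega
      have hA : stepA (pre ++ x :: y :: ys) st ((pre.length : Int), x) =
          (if gk x ≠ gk y then upd st (st.1 + gv x) (gk x)
           else (st.1 + gv x, st.2.1, st.2.2)) := by
        unfold stepA upd
        simp only [hget, hne, false_or, Option.map_some, Option.getD_some]
      rw [hA, aLoop_cons₂]

-- the boundary candidates of A's loop: (cumulative total at the end of each group, its key)
def cand : Int → List (List Int) → List (Int × Int)
  | _, [] => []
  | s, [x] => [(s + gv x, gk x)]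
  | s, x :: y :: ys =>
    if gk x ≠ gk y then (s + gv x, gk x) :: cand (s + gv x) (y :: ys)
    else cand (s + gv x) (y :: ys)

-- A's loop keeps (current, first strict max of the candidates seen so far)
lemma aLoop_eq_cand (l : List (List Int)) (s m k : Int) :
    (aLoop (s, m, k) l).2 = (cand s l).foldl updMax (m, k) := by
  induction l generalizing s m k with
  | nil => simp [aLoop, cand]
  | cons x xs ih =>
    cases xs with
    | nil =>
      rw [aLoop_single, cand]
      simp only [List.foldl_cons, List.foldl_nil, upd, updMax]
      split_ifs <;> rfl
    | cons y ys =>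
      rw [aLoop_cons₂, cand]
      by_cases h : gk x ≠ gk y
      · rw [if_pos h, if_pos h, List.foldl_cons]
        simp only [upd, updMax]
        split_ifs with h2
        · exact ih (s + gv x) (s + gv x) (gk x)
        · exact ih (s + gv x) m k
      · rw [if_neg h, if_neg h]
        exact ih (s + gv x) m k

-- B's zip/filterMap pipeline computes exactly the candidate list
lemma cands_eq_cand (l : List (List Int)) (s : Int) :
    (((accum s (l.map gv)).zip (l.map gk)).zip
        (((l.map gk).drop 1).map Option.some ++ [Option.none])).filterMap
      boundary = cand s l := by
  induction l generalizing s with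
  | nil => simp [accum, cand]
  | cons x xs ih =>
    cases xs with
    | nil => simp [accum, cand, List.filterMap, boundary]
    | cons y ys =>
      simp only [List.map_cons, accum, List.drop_succ_cons, List.drop_zero,
        List.zip_cons_cons, List.cons_append]
      have hih := ih (s + gv x)
      simp only [List.map_cons, List.drop_succ_cons, List.drop_zero, accum,
        List.zip_cons_cons] at hih
      rw [cand]
      by_cases h : gk x ≠ gk y
      · rw [List.filterMap_cons_some
            (show boundary ((s + gv x, gk x), some (gk y)) = some (s + gv x, gk x) by
              simp [boundary, h]),
          if_pos h, hih]
      · rw [List.filterMap_cons_none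
            (show boundary ((s + gv x, gk x), some (gk y)) = none by
              simp [boundary, not_not.mp h]),
          if_neg h, hih]

-- the strict-first-max fold from (0,0) equals max-then-threshold
lemma updMax_comm (a x : Int × Int) :
    updMax (updMax (0, 0) a) x = updMax (0, 0) (updMax a x) := by
  simp only [updMax]
  split_ifs <;> first | rfl | (exfalso; omega)

lemma foldl_updMax_zero (cs : List (Int × Int)) (a : Int × Int) :
    cs.foldl updMax (updMax (0, 0) a) =
      if (cs.foldl updMax a).1 > 0 then cs.foldl updMax a else (0, 0) := by
  induction cs generalizing a with
  | nil => simp [updMax]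
  | cons x xs ih =>
    simp only [List.foldl_cons]
    rw [updMax_comm, ih]

theorem port_a_eq (T : List (List Int)) : function T = function_alt T := by
  have hA : function T = (cand 0 T).foldl updMax (0, 0) := by
    have h := foldl_enum_eq_aLoop T [] (0, 0, 0)
    simp only [List.nil_append, List.length_nil, Nat.cast_zero] at h
    have h2 := aLoop_eq_cand T 0 0 0
    simp only [function, h, h2]
  rw [hA]
  simp only [function_alt]
  rw [cands_eq_cand T 0]
  cases h : cand 0 T with
  | nil => simp
  | cons c cs =>
    simp only [List.foldl_cons]
    exact foldl_updMax_zero cs c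

-- ===== VERDICT (by name: the statement is the Claim_ definition above) =====
theorem function_spec : Claim_equal_function := by
  intro T _ _
  unfold Spec_function
  exact port_a_eq T
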